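-- pv_equiv track=rewrite | github.com/ryrobes/larsql | rvbbit/rvbbit/utils.py | cull_old_conversation_history
-- ===== SOURCE A (Python) =====
-- from typing import Any, Callable, Dict, List, get_type_hints, Tuple, Optional
--
-- def cull_old_conversation_history(messages: List[Dict], keep_recent_turns: int = 10) -> List[Dict]:
--     """
--     Cull old conversation messages to prevent context bloat.
--
--     Keeps the most recent conversation turns and system messages in their natural flow position.
--     This prevents token explosion while preserving feedback loop context.
--
--     IMPORTANT: Does NOT move system messages to the front - leaves them in natural position
--     to avoid overriding recent feedback from the conversation.
--
--     Args:
--         messages: List of message dicts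
--         keep_recent_turns: Number of recent user/assistant message pairs to keep (default: 10)
--                           Set to 0 or None to disable culling (keep all messages)
--
--     Returns:
--         New list of messages with old conversation culled
--     """
--     import copy
--
--     # If culling disabled, return original messages
--     if not keep_recent_turns or keep_recent_turns <= 0:
--         return messages
--
--     # Strategy: Keep the last N messages total, preserving natural flow
--     # A turn typically has ~3 messages (user, assistant, tool), so multiply by 3
--     keep_count = keep_recent_turns * 3
--
--     if len(messages) <= keep_count:
--         # All messages fit within limit
--         return messages
--
--     # Keep only the most recent messages in their natural order
--     # This preserves the feedback loop context and recent conversation flow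
--     culled_messages = messages[-keep_count:]
--
--     # Find if there's a tool definition system message in the kept messages
--     has_tool_def = any(
--         msg.get("role") == "system" and ("Tool" in msg.get("content", "") or "tool" in msg.get("content", ""))
--         for msg in culled_messages
--     )
--
--     # If no tool definition in kept messages, prepend the most recent one from all messages
--     # This ensures agent always knows what tools are available
--     if not has_tool_def:
--         all_tool_systems = [
--             msg for msg in messages
--             if msg.get("role") == "system" and ("Tool" in msg.get("content", "") or "tool" in msg.get("content", ""))
--         ]
--         if all_tool_systems:
--             # Prepend ONLY the most recent tool definition
--             culled_messages.insert(0, all_tool_systems[-1])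
--
--     return culled_messages
-- ===== SOURCE B (Python) =====
-- def _is_tool_def(msg):
--     return msg.get("role") == "system" and (
--         "Tool" in msg.get("content", "") or "tool" in msg.get("content", "")
--     )
--
--
-- def cull_old_conversation_history(messages, keep_recent_turns=10):
--     # Same guard and keep_count logic as before; a single reverse scan finds the
--     # most recent tool-definition system message instead of any()+filter passes.
--     if not keep_recent_turns or keep_recent_turns <= 0:
--         return messages
--     keep_count = 3 * keep_recent_turns
--     n = len(messages)
--     if n <= keep_count:
--         return messages
--     cutoff = n - keep_count
--     tail = messages[cutoff:]
--     idx = None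
--     for i in range(n - 1, -1, -1):
--         if _is_tool_def(messages[i]):
--             idx = i
--             break
--     if idx is None or idx >= cutoff:
--         return tail
--     return [messages[idx]] + tail
-- ===== Notes on version B (the rewrite author's own statement) =====
-- stated objective: simpler
-- what changed: Replaces the any()-over-tail check plus the full filtered list of all tool-definition system messages with one reverse scan that finds the index of the most recent tool-definition message and a single position comparison against the cutoff.
import Mathlib
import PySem

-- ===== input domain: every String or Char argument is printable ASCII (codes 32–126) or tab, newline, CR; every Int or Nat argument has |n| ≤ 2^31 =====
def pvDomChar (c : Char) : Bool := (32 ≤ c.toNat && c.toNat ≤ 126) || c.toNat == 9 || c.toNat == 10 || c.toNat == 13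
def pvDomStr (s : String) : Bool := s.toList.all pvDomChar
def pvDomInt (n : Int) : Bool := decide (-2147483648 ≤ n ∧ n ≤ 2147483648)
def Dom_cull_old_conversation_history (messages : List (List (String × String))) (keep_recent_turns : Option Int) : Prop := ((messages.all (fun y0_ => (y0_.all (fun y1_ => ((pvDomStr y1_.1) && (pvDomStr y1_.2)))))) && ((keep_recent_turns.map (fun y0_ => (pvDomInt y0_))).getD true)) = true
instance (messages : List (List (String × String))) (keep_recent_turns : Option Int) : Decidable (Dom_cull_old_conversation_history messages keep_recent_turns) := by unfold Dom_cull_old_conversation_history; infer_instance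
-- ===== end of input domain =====

-- B replaces A's any()-over-tail + full filter pass with one reverse scan for the most recent
-- tool-definition message and a position comparison (objective: simpler).


-- shared predicate: the identical expression
--   msg.get("role") == "system" and ("Tool" in msg.get("content","") or "tool" in msg.get("content",""))
-- appears verbatim in both A and B
def pvIsToolDef (msg : List (String × String)) : Bool :=
  ((PySem.Dict.mk msg).get? "role" == some "system") &&
  (PySem.Str.isIn "Tool" ((PySem.Dict.mk msg).getD "content" "") ||
   PySem.Str.isIn "tool" ((PySem.Dict.mk msg).getD "content" ""))

-- ===== PORT A =====
def cull_old_conversation_history (messages : List (List (String × String))) (keep_recent_turns : Option Int) : List (List (String × String)) :=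
  match keep_recent_turns with
  | none => messages                       -- `not keep_recent_turns` with None
  | some k =>
    if k = 0 ∨ k ≤ 0 then messages         -- `not keep_recent_turns or keep_recent_turns <= 0`
    else
      let keep_count : Int := k * 3
      if (messages.length : Int) ≤ keep_count then messages
      else
        let culled := PySem.List.slice messages (some (-keep_count)) none   -- messages[-keep_count:]
        let has_tool_def := culled.any pvIsToolDef
        if has_tool_def then culled
        else
          let all_tool_systems := messages.filter pvIsToolDef
          match all_tool_systems.getLast? with        -- `if all_tool_systems: ... all_tool_systems[-1]`
          | none => culled
          | some m => PySem.List.insert culled 0 m    -- culled.insert(0, m)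

-- ===== PORT B =====
-- B's reverse for-loop with break: checks indices n-1, n-2, …, 0, returns the first hit.
def pvScanBack (messages : List (List (String × String))) : Nat → Option Nat
  | 0 => none
  | n + 1 => if pvIsToolDef (messages.getD n []) then some n else pvScanBack messages n

def cull_old_conversation_history_alt (messages : List (List (String × String))) (keep_recent_turns : Option Int) : List (List (String × String)) :=
  match keep_recent_turns with
  | none => messages
  | some k =>
    if k ≤ 0 then messages
    else
      let keep_count : Int := 3 * k
      let n : Int := messages.length
      if n ≤ keep_count then messages
      else
        let cutoff : Int := n - keep_count
        let tail := PySem.List.slice messages (some cutoff) none   -- messages[cutoff:]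
        match pvScanBack messages messages.length with
        | none => tail
        | some i =>
          if cutoff ≤ (i : Int) then tail
          else messages.getD i [] :: tail     -- [messages[idx]] + tail (idx is in range by construction)

-- ===== PRECONDITION & SPEC =====
def Spec_cull_old_conversation_history (messages : List (List (String × String))) (keep_recent_turns : Option Int) (out : List (List (String × String))) : Prop := out = cull_old_conversation_history_alt messages keep_recent_turns
instance (messages : List (List (String × String))) (keep_recent_turns : Option Int) (out : List (List (String × String))) : Decidable (Spec_cull_old_conversation_history messages keep_recent_turns out) := by unfold Spec_cull_old_conversation_history; infer_instance

-- ===== CLAIM (what is proved, stated in full; the proofs are below) =====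
def Claim_equal_cull_old_conversation_history : Prop := ∀ (messages : List (List (String × String))) (keep_recent_turns : Option Int), Dom_cull_old_conversation_history messages keep_recent_turns → Spec_cull_old_conversation_history messages keep_recent_turns (cull_old_conversation_history messages keep_recent_turns)

-- ===== LEMMAS AND PROOFS =====

-- Python list.insert at position 0 is cons.
theorem pvInsert_zero {α : Type} (xs : List α) (m : α) : PySem.List.insert xs 0 m = m :: xs := by
  simp [PySem.List.insert, PySem.List.sliceIndices]

-- pvScanBack only returns indices below its bound.
theorem pvScanBack_lt (xs : List (List (String × String))) (n i : Nat)
    (h : pvScanBack xs n = some i) : i < n := by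
  induction n with
  | zero => simp [pvScanBack] at h
  | succ m ih =>
    simp only [pvScanBack] at h
    split at h
    · injection h with h'; omega
    · exact Nat.lt_succ_of_lt (ih h)

-- pvScanBack ignores a final appended element while the bound stays within xs.
theorem pvScanBack_append (xs : List (List (String × String))) (x : List (String × String))
    (n : Nat) (hn : n ≤ xs.length) : pvScanBack (xs ++ [x]) n = pvScanBack xs n := by
  induction n with
  | zero => rfl
  | succ m ih =>
    simp only [pvScanBack]
    rw [List.getD_eq_getElem?_getD, List.getD_eq_getElem?_getD,
        List.getElem?_append_left (by omega), ih (by omega)]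

-- (xs.drop c).any p is true iff the last p-index (found by pvScanBack) is ≥ c.
theorem pvScanBack_any (xs : List (List (String × String))) (c : Nat) :
    ((xs.drop c).any pvIsToolDef = true ↔
      ∃ i, pvScanBack xs xs.length = some i ∧ c ≤ i) := by
  induction xs using List.reverseRecOn generalizing c with
  | nil => simp [pvScanBack]
  | append_singleton ys x ih =>
    have hlen : (ys ++ [x]).length = ys.length + 1 := by simp
    rw [hlen]
    simp only [pvScanBack, pvScanBack_append ys x ys.length le_rfl,
      List.getD_eq_getElem?_getD, List.getElem?_append_right le_rfl]
    simp only [Nat.sub_self, List.getElem?_cons_zero, Option.getD_some]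
    by_cases hx : pvIsToolDef x = true
    · simp only [hx, if_pos]
      constructor
      · intro h
        refine ⟨ys.length, rfl, ?_⟩
        by_contra hc
        push_neg at hc
        rw [List.drop_eq_nil_of_le (by simp; omega)] at h
        simp at h
      · rintro ⟨i, hi, hci⟩
        obtain rfl : i = ys.length := by injection hi; omega
        rw [List.drop_append_of_le_length hci, List.any_append]
        simp [hx]
    · rw [Bool.not_eq_true] at hx
      simp only [hx, Bool.false_eq_true, if_false]
      by_cases hc : c ≤ ys.length
      · rw [List.drop_append_of_le_length hc, List.any_append]
        simp only [List.any_cons, List.any_nil, hx, Bool.or_false]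
        exact ih c
      · push_neg at hc
        rw [List.drop_eq_nil_of_le (by simp; omega)]
        simp only [List.any_nil]
        constructor
        · intro h; exact absurd h (by simp)
        · rintro ⟨i, hi, hci⟩
          exact absurd (pvScanBack_lt ys ys.length i hi) (by omega)

-- pvScanBack finds exactly the last element of the filtered list (A's all_tool_systems[-1]).
theorem pvScanBack_filter (xs : List (List (String × String))) :
    (match pvScanBack xs xs.length with
     | none => xs.filter pvIsToolDef = []
     | some i => (xs.filter pvIsToolDef).getLast? = some (xs.getD i [])) := by
  induction xs using List.reverseRecOn with
  | nil => simp [pvScanBack]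
  | append_singleton ys x ih =>
    have hlen : (ys ++ [x]).length = ys.length + 1 := by simp
    rw [hlen]
    simp only [pvScanBack, pvScanBack_append ys x ys.length le_rfl,
      List.getD_eq_getElem?_getD, List.getElem?_append_right le_rfl]
    simp only [Nat.sub_self, List.getElem?_cons_zero, Option.getD_some, List.filter_append]
    by_cases hx : pvIsToolDef x = true
    · simp [hx]
    · rw [Bool.not_eq_true] at hx
      simp only [hx, Bool.false_eq_true, if_false, List.filter_cons, List.filter_nil,
        List.append_nil]
      cases h : pvScanBack ys ys.length with
      | none => simpa [h] using ih
      | some i =>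
        have hi := pvScanBack_lt ys ys.length i h
        rw [h] at ih
        simpa [List.getD_eq_getElem?_getD, List.getElem?_append_left hi] using ih

-- ===== VERDICT (by name: the statement is the Claim_ definition above) =====
theorem cull_old_conversation_history_spec : Claim_equal_cull_old_conversation_history := by
  intro messages ko _
  unfold Spec_cull_old_conversation_history
  cases ko with
  | none => rfl
  | some k =>
    simp only [cull_old_conversation_history, cull_old_conversation_history_alt]
    by_cases hk : k ≤ 0
    · rw [if_pos (Or.inr hk), if_pos hk]
    · rw [if_neg (by push_neg at hk ⊢; exact ⟨by omega, hk⟩), if_neg hk]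
      have hk' : 0 < k := lt_of_not_ge hk
      by_cases hl : (messages.length : Int) ≤ k * 3
      · rw [if_pos hl, if_pos (by rw [mul_comm 3 k]; exact hl)]
      · have hl3 : ¬ ((messages.length : Int) ≤ 3 * k) := by rw [mul_comm]; exact hl
        rw [if_neg hl, if_neg hl3]
        -- both slices are drop c for c = length - 3k
        have hkc : (0:Int) < k * 3 := by positivity
        have hlen : k * 3 < (messages.length : Int) := lt_of_not_ge hl
        set c : Nat := messages.length - (k*3).toNat with hc
        have hcast : ((k*3).toNat : Int) = k * 3 := Int.toNat_of_nonneg (le_of_lt hkc)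
        have hA : PySem.List.slice messages (some (-(k*3))) none = messages.drop c := by
          rw [PySem.List.slice_some_none]
          congr 1
          have := PySem.List.clampIdx_neg_natCast messages.length (k*3).toNat
            (by omega)
          rw [← hcast, this]
        have hcut : (messages.length : Int) - 3 * k = (c : Int) := by
          rw [hc]; push_cast [Nat.cast_sub (by omega : (k*3).toNat ≤ messages.length)]
          rw [hcast]; ring
        have hB : PySem.List.slice messages (some ((messages.length : Int) - 3 * k)) none
            = messages.drop c := by
          rw [hcut, PySem.List.slice_from messages (Int.natCast_nonneg c), Int.toNat_natCast]
        rw [hA, hB]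
        have hfilt := pvScanBack_filter messages
        cases hs : pvScanBack messages messages.length with
        | none =>
          rw [hs] at hfilt
          have hany : (messages.drop c).any pvIsToolDef = false := by
            rw [← Bool.not_eq_true]
            intro h
            obtain ⟨i, hi, _⟩ := (pvScanBack_any messages c).mp h
            rw [hs] at hi; simp at hi
          simp [hany, hfilt]
        | some i =>
          rw [hs] at hfilt
          by_cases hci : c ≤ i
          · have hany : (messages.drop c).any pvIsToolDef = true :=
              (pvScanBack_any messages c).mpr ⟨i, hs, hci⟩
            have hord : (messages.length : Int) - 3 * k ≤ (i : Int) := by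
              rw [hcut]; exact_mod_cast hci
            simp [hany, hord]
          · have hany : (messages.drop c).any pvIsToolDef = false := by
              rw [← Bool.not_eq_true]
              intro h
              obtain ⟨j, hj, hcj⟩ := (pvScanBack_any messages c).mp h
              rw [hs] at hj
              obtain rfl : j = i := by injection hj with h'; omega
              exact hci hcj
            have hord : ¬ ((messages.length : Int) - 3 * k ≤ (i : Int)) := by
              rw [hcut]; exact_mod_cast hci
            have hfilt' : (List.filter pvIsToolDef messages).getLast? =
                some (messages.getD i []) := hfilt
            simp [hany, hord, hfilt', pvInsert_zero, List.getD_eq_getElem?_getD]
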